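-- pv_equiv track=rewrite | github.com/cyber-data-alchemist/A01793023_A4.2 | convertNumbers.py | __add_one_to_hex
-- ===== SOURCE A (Python) =====
-- def __add_one_to_hex(hex_string):
--     """
--     Adds one to a hexadecimal string.
--     """
--     hex_digits = '0123456789ABCDEF'
--     result = ''
--     carry = 1
--
--     for digit in reversed(hex_string):
--         if carry == 0:
--             result = digit + result
--             continue
--
--         index = hex_digits.index(digit) + carry
--         if index >= 16:
--             result = '0' + result
--             carry = 1
--         else:
--             result = hex_digits[index] + result
--             carry = 0
--
--     return result
-- ===== SOURCE B (Python) =====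
-- def __add_one_to_hex(hex_string):
--     """
--     Adds one to a hexadecimal string.
--     """
--     hex_digits = '0123456789ABCDEF'
--     body = hex_string.rstrip('F')
--     if not body:
--         # all digits were 'F' (or the string is empty): overflow truncates
--         return '0' * len(hex_string)
--     bumped = hex_digits[hex_digits.index(body[-1]) + 1]
--     return body[:-1] + bumped + '0' * (len(hex_string) - len(body))
-- ===== Notes on version B (the rewrite author's own statement) =====
-- stated objective: simpler
-- what changed: B replaces the right-to-left carry-propagation loop by a single partition of the string at its last non-'F' digit (rstrip('F')): one index bump plus string concatenation, no per-digit loop or carry state.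
import Mathlib
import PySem

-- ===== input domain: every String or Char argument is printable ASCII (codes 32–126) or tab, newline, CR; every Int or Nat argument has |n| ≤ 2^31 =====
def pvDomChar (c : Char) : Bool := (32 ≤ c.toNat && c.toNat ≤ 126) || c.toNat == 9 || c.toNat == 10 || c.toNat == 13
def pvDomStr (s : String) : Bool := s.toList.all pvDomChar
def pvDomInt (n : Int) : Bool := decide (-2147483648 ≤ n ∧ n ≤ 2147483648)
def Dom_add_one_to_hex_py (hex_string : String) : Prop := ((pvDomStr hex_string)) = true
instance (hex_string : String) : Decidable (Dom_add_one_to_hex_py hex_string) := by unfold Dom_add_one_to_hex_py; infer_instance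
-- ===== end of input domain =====

-- B partitions the string at its last non-'F' digit (rstrip('F')) and bumps one
-- character, instead of A's right-to-left carry-propagation loop: simpler.


-- ===== PORT A =====
def pvHexDigits : List Char := "0123456789ABCDEF".toList

-- one iteration of A's for-loop; state = (result, carry).
-- hex_digits.index(digit) raises ValueError when digit is not an uppercase hex
-- digit; Pre_ excludes exactly those inputs, so the .getD defaults are never hit.
def addOneStepA (st : List Char × Int) (digit : Char) : List Char × Int :=
  if st.2 = 0 then (digit :: st.1, st.2)
  else
    let index : Int := ((PySem.List.index? pvHexDigits digit).getD 0 : Int) + st.2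
    if index ≥ 16 then ('0' :: st.1, 1)
    else ((PySem.List.pyGet? pvHexDigits index).getD ' ' :: st.1, 0)

def add_one_to_hex_py (hex_string : String) : String :=
  String.ofList (hex_string.toList.reverse.foldl addOneStepA ([], 1)).1

-- ===== PORT B =====
-- Source B: body = hex_string.rstrip('F') (ported by hand, exact: drop trailing 'F');
-- if empty return '0'*len; else bump body[-1] and pad with '0's.
def add_one_to_hex_py_alt (hex_string : String) : String :=
  let cs := hex_string.toList
  let body := (cs.reverse.dropWhile (· == 'F')).reverse
  if body.isEmpty then String.ofList (List.replicate cs.length '0')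
  else
    let last := (PySem.List.pyGet? body (-1)).getD ' '   -- body[-1]
    let bumped := (PySem.List.pyGet? pvHexDigits
      (((PySem.List.index? pvHexDigits last).getD 0 : Int) + 1)).getD ' '
    String.ofList (body.dropLast ++ [bumped] ++ List.replicate (cs.length - body.length) '0')

-- ===== PRECONDITION & SPEC =====
-- Pre_ excludes exactly the inputs on which A raises ValueError (the last
-- non-'F' character is not one of '0'..'9','A'..'E'); B raises there too.
def Pre_add_one_to_hex_py (hex_string : String) : Prop :=
  ((hex_string.toList.reverse.dropWhile (· == 'F')).head?.all
    (fun c => "0123456789ABCDE".toList.contains c)) = true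
instance (hex_string : String) : Decidable (Pre_add_one_to_hex_py hex_string) := by unfold Pre_add_one_to_hex_py; infer_instance
def pvWitness_add_one_to_hex_py : String := "1AFF"
def Spec_add_one_to_hex_py (hex_string : String) (out : String) : Prop := out = add_one_to_hex_py_alt hex_string
instance (hex_string : String) (out : String) : Decidable (Spec_add_one_to_hex_py hex_string out) := by unfold Spec_add_one_to_hex_py; infer_instance

-- ===== CLAIM (what is proved, stated in full; the proofs are below) =====
def Claim_equal_add_one_to_hex_py : Prop := ∀ (hex_string : String), Dom_add_one_to_hex_py hex_string → Pre_add_one_to_hex_py hex_string → Spec_add_one_to_hex_py hex_string (add_one_to_hex_py hex_string)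

-- ===== LEMMAS AND PROOFS =====
-- with carry 0, A's loop just prepends each digit
theorem foldl_stepA_carry0 (l : List Char) (a : List Char) :
    List.foldl addOneStepA (a, 0) l = (l.reverse ++ a, 0) := by
  induction l generalizing a with
  | nil => simp
  | cons c t ih => simp [addOneStepA, ih]

-- with carry 1, a block of 'F's turns into '0's and the carry survives
theorem foldl_stepA_Fs (k : ℕ) (a : List Char) :
    List.foldl addOneStepA (a, 1) (List.replicate k 'F') =
      (List.replicate k '0' ++ a, 1) := by
  induction k generalizing a with
  | zero => simp
  | succ n ih =>
    have hidx : List.idxOf? 'F' pvHexDigits = some 15 := by decide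
    simp [List.replicate_succ, addOneStepA, hidx, ih]
    rw [show ('0' :: (List.replicate n '0' ++ a)) = List.replicate (n+1) '0' ++ a from by rw [List.replicate_succ]; rfl,
        List.replicate_succ']
    simp

theorem takeWhile_F_eq_replicate (l : List Char) :
    l.takeWhile (· == 'F') = List.replicate (l.takeWhile (· == 'F')).length 'F' := by
  apply List.eq_replicate_of_mem
  intro c hc
  simpa using List.mem_takeWhile_imp hc

theorem index?_pvHexDigits_lt (c : Char) (hc : c ∈ "0123456789ABCDE".toList) :
    ∃ i : ℕ, PySem.List.index? pvHexDigits c = some i ∧ i < 15 := by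
  have hsplit : pvHexDigits = "0123456789ABCDE".toList ++ ['F'] := by decide
  rw [hsplit, PySem.List.index?_append_of_mem _ hc]
  have hs : (PySem.List.index? "0123456789ABCDE".toList c).isSome :=
    (PySem.List.index?_isSome_iff _ _).mpr hc
  obtain ⟨i, hi⟩ := Option.isSome_iff_exists.mp hs
  refine ⟨i, hi, ?_⟩
  obtain ⟨pre, suf, hps, hlen, _⟩ := (PySem.List.index?_eq_some_iff _ _ _).mp hi
  have : ("0123456789ABCDE".toList).length = 15 := by decide
  rw [hps] at this
  simp at this
  omega

-- the loop step on a valid (non-'F' hex) digit with carry 1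
theorem stepA_valid (a : List Char) (c : Char) (hc : c ∈ "0123456789ABCDE".toList) :
    addOneStepA (a, 1) c =
      ((PySem.List.pyGet? pvHexDigits
        (((PySem.List.index? pvHexDigits c).getD 0 : Int) + 1)).getD ' ' :: a, 0) := by
  obtain ⟨i, hi, hlt⟩ := index?_pvHexDigits_lt c hc
  have hi' : List.idxOf? c pvHexDigits = some i := by simpa using hi
  simp [addOneStepA, hi']
  omega

-- ===== VERDICT (by name: the statement is the Claim_ definition above) =====
theorem add_one_to_hex_py_spec : Claim_equal_add_one_to_hex_py := by
  unfold Claim_equal_add_one_to_hex_py Spec_add_one_to_hex_py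
  intro s _ hpre
  unfold Pre_add_one_to_hex_py at hpre
  simp only [add_one_to_hex_py, add_one_to_hex_py_alt]
  have hr : s.toList.reverse =
      List.replicate (s.toList.reverse.takeWhile (· == 'F')).length 'F' ++
        s.toList.reverse.dropWhile (· == 'F') := by
    conv_lhs => rw [← List.takeWhile_append_dropWhile (p := (· == 'F')) (l := s.toList.reverse)]
    rw [← takeWhile_F_eq_replicate]
  set k := (s.toList.reverse.takeWhile (· == 'F')).length with hk
  cases ht : s.toList.reverse.dropWhile (· == 'F') with
  | nil =>
    rw [ht] at hr
    have hlen : s.toList.length = k := by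
      have := congrArg List.length hr
      simpa using this
    rw [hr]
    simp [foldl_stepA_Fs, hlen]
  | cons c rest =>
    have hc : c ∈ "0123456789ABCDE".toList := by
      rw [ht] at hpre; simpa using hpre
    rw [ht] at hr
    have hlen : s.toList.length = k + (rest.length + 1) := by
      have := congrArg List.length hr
      simpa using this
    rw [hr]
    rw [List.foldl_append, foldl_stepA_Fs]
    simp only [List.append_nil, List.foldl_cons, stepA_valid _ c hc, foldl_stepA_carry0]
    simp [List.reverse_cons, PySem.List.pyGet?_neg_one_append_singleton, hlen]
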